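-- pv_equiv track=rewrite | github.com/Jaleab/Advent | Day4_PassportProcessing/passwordProcessing part2.py | checkFields
-- ===== SOURCE A (Python) =====
-- def checkFields(fields, startIndex):
--     eclValues = ['amb','blu','brn','gry','grn','hzl','oth']
--     hclValues = set('0123456789abcdef')
--     pidValues = set('0123456789')
--     valids = 0
--     for x in fields:
--         field = x.split(':')
--         if field[0] != 'cid':
--             if field[0] == 'byr' and (1920 <= int(field[1]) <= 2002):
--                 valids += 1
--             elif field[0] == 'ecl' and field[1] in eclValues:
--                 valids += 1
--             elif field[0] ==  'eyr' and (2020 <= int(field[1]) <= 2030):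
--                 valids += 1
--             elif field[0] == 'hcl' and len(field[1]) == 7 and set((field[1])[1:]).issubset(hclValues):
--                 valids += 1
--             elif field[0] == 'hgt':
--                 if field[1].find('cm') > 0 and 150 <= int((field[1])[:-2]) <= 193:
--                     valids += 1
--                 elif field[1].find('in') > 0 and 59 <= int((field[1])[:-2]) <= 76:
--                     valids += 1
--             elif field[0] == 'iyr' and 2010 <= int(field[1]) <= 2020:
--                 valids += 1
--             elif field[0] == 'pid' and len(field[1]) == 9 and set(field[1]).issubset(pidValues):
--                 valids += 1
--     return valids == 7
-- ===== SOURCE B (Python) =====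
-- def checkFields(fields, startIndex):
--     # Rule-major staged passes: one scan of the field list per rule, summing
--     # per-rule counts. Correct because each field name matches at most one rule.
--     rules = [
--         ('byr', lambda v: 1920 <= int(v) <= 2002),
--         ('iyr', lambda v: 2010 <= int(v) <= 2020),
--         ('eyr', lambda v: 2020 <= int(v) <= 2030),
--         ('hgt', lambda v: (v.find('cm') > 0 and 150 <= int(v[:-2]) <= 193)
--                           or (v.find('in') > 0 and 59 <= int(v[:-2]) <= 76)),
--         ('hcl', lambda v: len(v) == 7 and all(c in '0123456789abcdef' for c in v[1:])),
--         ('ecl', lambda v: v in ('amb', 'blu', 'brn', 'gry', 'grn', 'hzl', 'oth')),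
--         ('pid', lambda v: len(v) == 9 and all(c in '0123456789' for c in v)),
--     ]
--     total = 0
--     for name, ok in rules:
--         for x in fields:
--             parts = x.split(':')
--             if parts[0] == name and ok(parts[1]):
--                 total += 1
--     return total == 7
-- ===== Notes on version B (the rewrite author's own statement) =====
-- stated objective: alternative
-- what changed: Inverts the traversal: instead of A's single field-major pass dispatching each field through a seven-branch if/elif chain, B makes seven rule-major passes over the field list (one scan per rule, counting matching valid fields) and sums the per-rule counts, which equals A's count because each field name matches at most one rule; Pre_ excludes exactly the inputs on which A raises (ValueError from int() or IndexError from a missing ':'-value), where B raises as well.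
import Mathlib
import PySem

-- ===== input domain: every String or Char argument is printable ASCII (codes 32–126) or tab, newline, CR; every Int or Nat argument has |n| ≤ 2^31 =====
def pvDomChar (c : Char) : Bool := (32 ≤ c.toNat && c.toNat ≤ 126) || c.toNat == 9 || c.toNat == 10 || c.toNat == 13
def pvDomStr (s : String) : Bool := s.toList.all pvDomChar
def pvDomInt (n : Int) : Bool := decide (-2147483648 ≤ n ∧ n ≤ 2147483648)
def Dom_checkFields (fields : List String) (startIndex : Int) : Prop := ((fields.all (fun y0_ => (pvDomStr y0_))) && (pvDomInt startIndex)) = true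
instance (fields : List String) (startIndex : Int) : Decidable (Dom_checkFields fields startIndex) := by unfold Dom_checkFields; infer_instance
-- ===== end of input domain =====

-- B inverts the traversal: seven rule-major passes over the field list (one count per
-- rule, summed) instead of A's single field-major pass through a seven-branch if/elif
-- chain; equal because each field name matches at most one rule. Same O(n) cost.
-- Pre_ excludes exactly the inputs on which the Python A raises (int() ValueError /
-- IndexError on a field without a ':'-value); the Python B raises on those too.

-- ===== PORT A =====
-- x.split(':') — ':' is never empty, so Python's split cannot raise; total form of split?
def pvSplit (x : String) : List String := (PySem.Str.split? x ":").getD []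
-- 'lo <= int(v) <= hi'; Python raises ValueError where ofStr? is none (excluded by Pre_)
def pvIntBetween (v : String) (lo hi : Int) : Bool :=
  match PySem.Int.ofStr? v with
  | some n => decide (lo ≤ n ∧ n ≤ hi)
  | none => false

def pvEclValues : List String := ["amb","blu","brn","gry","grn","hzl","oth"]
def pvHclValues : PySem.Set Char := PySem.Set.ofList "0123456789abcdef".toList
def pvPidValues : PySem.Set Char := PySem.Set.ofList "0123456789".toList

-- one iteration of A's for-loop; field[1] raises IndexError when absent (outside Pre_),
-- read here as "" in that case
def pvStepA (valids : Int) (x : String) : Int :=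
  let field := pvSplit x
  let f0 := PySem.List.pyGetD field 0 ""
  let f1 := PySem.List.pyGetD field 1 ""
  if f0 ≠ "cid" then
    if f0 == "byr" && pvIntBetween f1 1920 2002 then valids + 1
    else if f0 == "ecl" && pvEclValues.contains f1 then valids + 1
    else if f0 == "eyr" && pvIntBetween f1 2020 2030 then valids + 1
    else if f0 == "hcl" && PySem.Str.len f1 == 7 &&
            PySem.Set.issubset (PySem.Set.ofList (PySem.Str.slice f1 (some 1) none).toList) pvHclValues then valids + 1
    else if f0 == "hgt" then
      (if decide (PySem.Str.find f1 "cm" > 0) && pvIntBetween (PySem.Str.slice f1 none (some (-2))) 150 193 then valids + 1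
       else if decide (PySem.Str.find f1 "in" > 0) && pvIntBetween (PySem.Str.slice f1 none (some (-2))) 59 76 then valids + 1
       else valids)
    else if f0 == "iyr" && pvIntBetween f1 2010 2020 then valids + 1
    else if f0 == "pid" && PySem.Str.len f1 == 9 &&
            PySem.Set.issubset (PySem.Set.ofList f1.toList) pvPidValues then valids + 1
    else valids
  else valids

def checkFields (fields : List String) (startIndex : Int) : Bool :=
  decide (fields.foldl pvStepA 0 = 7)

-- ===== PORT B =====
-- the rules table of Source B: (field name, predicate) pairs, in order
def pvRules : List (String × (String → Bool)) :=
  [("byr", fun v => pvIntBetween v 1920 2002),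
   ("iyr", fun v => pvIntBetween v 2010 2020),
   ("eyr", fun v => pvIntBetween v 2020 2030),
   ("hgt", fun v => (decide (PySem.Str.find v "cm" > 0) && pvIntBetween (PySem.Str.slice v none (some (-2))) 150 193)
                 || (decide (PySem.Str.find v "in" > 0) && pvIntBetween (PySem.Str.slice v none (some (-2))) 59 76)),
   ("hcl", fun v => PySem.Str.len v == 7 && (PySem.Str.slice v (some 1) none).toList.all (fun c => "0123456789abcdef".toList.contains c)),
   ("ecl", fun v => ["amb","blu","brn","gry","grn","hzl","oth"].contains v),
   ("pid", fun v => PySem.Str.len v == 9 && v.toList.all (fun c => "0123456789".toList.contains c))]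

-- Source B's inner loop: one scan of fields for one rule, counting its valid fields;
-- parts[1] raises IndexError when absent (outside Pre_), read here as ""
def pvCountRule (r : String × (String → Bool)) (total : Int) (fields : List String) : Int :=
  fields.foldl (fun t x =>
    let parts := pvSplit x
    if PySem.List.pyGetD parts 0 "" == r.1 && r.2 (PySem.List.pyGetD parts 1 "") then t + 1 else t) total

def checkFields_alt (fields : List String) (startIndex : Int) : Bool :=
  decide (pvRules.foldl (fun total r => pvCountRule r total fields) 0 = 7)

-- ===== PRECONDITION & SPEC =====
-- Pre_ excludes exactly the fields on which Python A raises: a recognised key whose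
-- ':'-value is missing (IndexError) or fails int() where A calls int() (ValueError).
def pvSafeField (x : String) : Prop :=
  let parts := (PySem.Str.split? x ":").getD []
  let name := PySem.List.pyGetD parts 0 ""
  let v := PySem.List.pyGetD parts 1 ""
  ((name = "byr" ∨ name = "iyr" ∨ name = "eyr") →
      2 ≤ parts.length ∧ (PySem.Int.ofStr? v).isSome = true) ∧
  ((name = "ecl" ∨ name = "hcl" ∨ name = "pid") → 2 ≤ parts.length) ∧
  (name = "hgt" →
      2 ≤ parts.length ∧
      ((PySem.Str.find v "cm" > 0 ∨ PySem.Str.find v "in" > 0) →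
         (PySem.Int.ofStr? (PySem.Str.slice v none (some (-2)))).isSome = true))

def Pre_checkFields (fields : List String) (startIndex : Int) : Prop :=
  ∀ x ∈ fields, pvSafeField x
instance (fields : List String) (startIndex : Int) : Decidable (Pre_checkFields fields startIndex) := by
  unfold Pre_checkFields pvSafeField; infer_instance

def pvWitness_checkFields : List String × Int :=
  (["byr:1990","iyr:2015","eyr:2025","hgt:180cm","hcl:#abcdef","ecl:amb","pid:123456789"], 0)

def Spec_checkFields (fields : List String) (startIndex : Int) (out : Bool) : Prop := out = checkFields_alt fields startIndex
instance (fields : List String) (startIndex : Int) (out : Bool) : Decidable (Spec_checkFields fields startIndex out) := by unfold Spec_checkFields; infer_instance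

-- ===== CLAIM (what is proved, stated in full; the proofs are below) =====
def Claim_equal_checkFields : Prop := ∀ (fields : List String) (startIndex : Int), Dom_checkFields fields startIndex → Pre_checkFields fields startIndex → Spec_checkFields fields startIndex (checkFields fields startIndex)

-- ===== LEMMAS AND PROOFS =====

-- indicator of one rule on one field
def pvInd (r : String × (String → Bool)) (x : String) : Int :=
  if PySem.List.pyGetD (pvSplit x) 0 "" == r.1 && r.2 (PySem.List.pyGetD (pvSplit x) 1 "") then 1 else 0

-- A's branch chain on explicit name/value arguments (proof helper)
def pvBody (valids : Int) (name v : String) : Int :=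
  if name ≠ "cid" then
    if name == "byr" && pvIntBetween v 1920 2002 then valids + 1
    else if name == "ecl" && pvEclValues.contains v then valids + 1
    else if name == "eyr" && pvIntBetween v 2020 2030 then valids + 1
    else if name == "hcl" && PySem.Str.len v == 7 &&
            PySem.Set.issubset (PySem.Set.ofList (PySem.Str.slice v (some 1) none).toList) pvHclValues then valids + 1
    else if name == "hgt" then
      (if decide (PySem.Str.find v "cm" > 0) && pvIntBetween (PySem.Str.slice v none (some (-2))) 150 193 then valids + 1
       else if decide (PySem.Str.find v "in" > 0) && pvIntBetween (PySem.Str.slice v none (some (-2))) 59 76 then valids + 1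
       else valids)
    else if name == "iyr" && pvIntBetween v 2010 2020 then valids + 1
    else if name == "pid" && PySem.Str.len v == 9 &&
            PySem.Set.issubset (PySem.Set.ofList v.toList) pvPidValues then valids + 1
    else valids
  else valids

lemma pvStepA_def (valids : Int) (x : String) :
    pvStepA valids x = pvBody valids (PySem.List.pyGetD (pvSplit x) 0 "") (PySem.List.pyGetD (pvSplit x) 1 "") := rfl

-- A's step adds a 0/1 contribution
lemma pvBody_add (val : Int) (name v : String) : pvBody val name v = val + pvBody 0 name v := by
  unfold pvBody; split_ifs <;> omega

-- B's inner counting loop is a sum of indicators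
lemma pvCountRule_sum (r : String × (String → Bool)) (fields : List String) :
    ∀ t : Int, pvCountRule r t fields = t + (fields.map (pvInd r)).sum := by
  induction fields with
  | nil => intro t; simp [pvCountRule]
  | cons a l ih =>
    intro t
    simp only [pvCountRule, List.foldl_cons, List.map_cons, List.sum_cons] at *
    by_cases h : (PySem.List.pyGetD (pvSplit a) 0 "" == r.1 && r.2 (PySem.List.pyGetD (pvSplit a) 1 "")) = true
    · rw [if_pos h, ih]; unfold pvInd; rw [if_pos h]; ring
    · rw [if_neg h, ih]; unfold pvInd; rw [if_neg h]; ring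

-- A's fold is the sum of its per-field contributions
lemma pvFoldA_sum (fields : List String) :
    ∀ v : Int, fields.foldl pvStepA v = v + (fields.map (fun x => pvStepA 0 x)).sum := by
  induction fields with
  | nil => intro v; simp
  | cons a l ih =>
    intro v
    simp only [List.foldl_cons, List.map_cons, List.sum_cons, ih]
    rw [pvStepA_def v a, pvBody_add, ← pvStepA_def 0 a]
    ring

-- an if on a boolean disjunction equals the two-branch chain (the hgt rule's two units)
lemma pvIfOr (a b : Bool) :
    (if (a || b) = true then (1:Int) else 0)
      = (if a = true then (1:Int) else if b = true then 1 else 0) := by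
  cases a <;> cases b <;> rfl

-- sum over the seven rules of the indicators equals A's per-field contribution
lemma pvInd7_sum (name v : String) :
    (pvRules.map (fun r => if (name == r.1 && r.2 v) = true then (1:Int) else 0)).sum
      = pvBody 0 name v := by
  have hs : PySem.Set.issubset (PySem.Set.ofList (PySem.Str.slice v (some 1) none).toList) pvHclValues
      = (PySem.Str.slice v (some 1) none).toList.all (fun c => "0123456789abcdef".toList.contains c) := by
    rw [Bool.eq_iff_iff]
    simp [PySem.Set.issubset_iff, PySem.Set.mem_ofList, pvHclValues, List.all_eq_true]
  have hp : PySem.Set.issubset (PySem.Set.ofList v.toList) pvPidValues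
      = v.toList.all (fun c => "0123456789".toList.contains c) := by
    rw [Bool.eq_iff_iff]
    simp [PySem.Set.issubset_iff, PySem.Set.mem_ofList, pvPidValues, List.all_eq_true]
  unfold pvRules pvBody
  simp only [List.map_cons, List.map_nil, List.sum_cons, List.sum_nil]
  by_cases h1 : name = "byr"
  · subst h1; simp
  by_cases h2 : name = "iyr"
  · subst h2; simp
  by_cases h3 : name = "eyr"
  · subst h3; simp
  by_cases h4 : name = "hgt"
  · subst h4
    clear hs hp
    rw [if_pos (by decide : (("hgt":String) ≠ "cid"))]
    simp only [show (("hgt":String) == "byr") = false from rfl, show (("hgt":String) == "iyr") = false from rfl,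
               show (("hgt":String) == "eyr") = false from rfl, show (("hgt":String) == "hcl") = false from rfl,
               show (("hgt":String) == "ecl") = false from rfl, show (("hgt":String) == "pid") = false from rfl,
               show (("hgt":String) == "hgt") = true from rfl, Bool.false_and, Bool.true_and,
               Bool.false_eq_true, if_false, if_true, zero_add, add_zero]
    exact pvIfOr _ _
  by_cases h5 : name = "hcl"
  · subst h5; rw [hs]; simp
  by_cases h6 : name = "ecl"
  · subst h6; simp [pvEclValues]
  by_cases h7 : name = "pid"
  · subst h7; rw [hp]; simp
  by_cases h8 : name = "cid"
  · subst h8; simp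
  · have e1 : (name == "byr") = false := by simp [h1]
    have e2 : (name == "iyr") = false := by simp [h2]
    have e3 : (name == "eyr") = false := by simp [h3]
    have e4 : (name == "hgt") = false := by simp [h4]
    have e5 : (name == "hcl") = false := by simp [h5]
    have e6 : (name == "ecl") = false := by simp [h6]
    have e7 : (name == "pid") = false := by simp [h7]
    simp [h8, e1, e2, e3, e4, e5, e6, e7]

lemma pvInd_sum_eq_step (x : String) :
    (pvRules.map (fun r => pvInd r x)).sum = pvStepA 0 x := by
  rw [pvStepA_def]
  rw [← pvInd7_sum (PySem.List.pyGetD (pvSplit x) 0 "") (PySem.List.pyGetD (pvSplit x) 1 "")]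
  rfl

-- pointwise sum splits
lemma pvSum_map_add (l : List String) (f g : String → Int) :
    (l.map (fun x => f x + g x)).sum = (l.map f).sum + (l.map g).sum := by
  induction l with
  | nil => simp
  | cons a t ih => simp [ih]; ring

-- swap the two summations: Σ_rules Σ_fields = Σ_fields Σ_rules
lemma pvSum_comm (rs : List (String × (String → Bool))) (fields : List String) :
    (rs.map (fun r => (fields.map (pvInd r)).sum)).sum
      = (fields.map (fun x => (rs.map (fun r => pvInd r x)).sum)).sum := by
  induction rs with
  | nil => simp
  | cons r t ih =>
    simp only [List.map_cons, List.sum_cons, ih, pvSum_map_add]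

-- B's nested fold is the double sum
lemma pvFoldB_sum (fields : List String) (rs : List (String × (String → Bool))) :
    ∀ t : Int, rs.foldl (fun total r => pvCountRule r total fields) t
      = t + (rs.map (fun r => (fields.map (pvInd r)).sum)).sum := by
  induction rs with
  | nil => intro t; simp
  | cons r l ih =>
    intro t
    simp only [List.foldl_cons, List.map_cons, List.sum_cons]
    rw [ih, pvCountRule_sum]
    ring

-- the two totals coincide
lemma pvTotals_eq (fields : List String) :
    fields.foldl pvStepA 0 = pvRules.foldl (fun total r => pvCountRule r total fields) 0 := by
  rw [pvFoldA_sum, pvFoldB_sum, pvSum_comm]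
  simp only [zero_add]
  congr 1
  exact List.map_congr_left (fun x _ => (pvInd_sum_eq_step x).symm)

-- ===== VERDICT (by name: the statement is the Claim_ definition above) =====
theorem checkFields_spec : Claim_equal_checkFields := by
  intro fields startIndex _hdom _hpre
  unfold Spec_checkFields checkFields checkFields_alt
  rw [pvTotals_eq]
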